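-- pv_equiv track=rewrite | github.com/YL-byte/Simple-Geographic-Data-Analysis-For-Apps | Geographic Analysis for app optimization.py | remove_contained_groups
-- ===== SOURCE A (Python) =====
-- def is_small_list_in_large_list(small_list, large_list):
--     value = True
--     for row in small_list:
--         if row not in large_list:
--             value = False
--     return value
--
-- def remove_contained_groups(groups):
--     new_table = []
--     for current_group in sorted(groups, key = len):
--         add_current_group = True
--         for compared_group in sorted(groups, key = len):
--             if len(compared_group) > len(current_group):
--                 if is_small_list_in_large_list(current_group, compared_group) == True:
--                     add_current_group = False
--         if add_current_group == True and current_group not in new_table: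
--             new_table.append(current_group)
--     return new_table
-- ===== SOURCE B (Python) =====
-- def remove_contained_groups(groups):
--     # Phase 1: build the list of maximal groups (length-descending scan):
--     # a group is kept unless it is a strict subset of an already-kept group.
--     maximal = []
--     for g in sorted(groups, key=len, reverse=True):
--         if not any(len(h) > len(g) and all(x in h for x in g) for h in maximal):
--             maximal.append(g)
--     # Phase 2: emit, in length-ascending stable order without duplicates,
--     # every group not strictly contained in a maximal group.
--     result = []
--     for g in sorted(groups, key=len):
--         if not any(len(h) > len(g) and all(x in h for x in g) for h in maximal):
--             if g not in result:
--                 result.append(g)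
--     return result
-- ===== Notes on version B (the rewrite author's own statement) =====
-- stated objective: alternative
-- what changed: Replaces A's nested rescan of all groups for every group by a two-phase pass: first build the list of maximal groups with a length-descending scan, then emit survivors (length-ascending, deduplicated) by testing containment only against that maximal list.
import Mathlib
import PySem

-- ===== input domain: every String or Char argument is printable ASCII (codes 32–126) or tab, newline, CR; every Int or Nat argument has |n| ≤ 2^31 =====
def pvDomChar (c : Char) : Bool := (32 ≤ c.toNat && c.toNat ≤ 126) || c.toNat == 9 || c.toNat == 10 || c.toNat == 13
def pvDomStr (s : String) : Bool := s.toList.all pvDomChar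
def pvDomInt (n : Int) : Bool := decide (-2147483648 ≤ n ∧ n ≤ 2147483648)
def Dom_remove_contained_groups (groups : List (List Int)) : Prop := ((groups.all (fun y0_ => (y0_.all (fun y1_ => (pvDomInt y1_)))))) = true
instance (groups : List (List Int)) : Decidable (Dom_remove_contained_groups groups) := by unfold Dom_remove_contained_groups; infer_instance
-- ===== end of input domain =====

-- B replaces A's full nested rescan by a two-phase pass: first build the list of
-- maximal groups, then emit survivors against that (usually smaller) list;
-- objective: alternative algorithm, same worst-case cost.

-- ===== PORT A =====
def is_small_list_in_large_list (small_list large_list : List Int) : Bool :=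
  small_list.foldl (fun value row => if !(large_list.contains row) then false else value) true

def remove_contained_groups (groups : List (List Int)) : List (List Int) :=
  (PySem.List.sorted groups (fun g => g.length) false).foldl
    (fun new_table current_group =>
      let add_current_group :=
        (PySem.List.sorted groups (fun g => g.length) false).foldl
          (fun add compared_group =>
            if compared_group.length > current_group.length then
              (if is_small_list_in_large_list current_group compared_group == true then false else add)
            else add) true
      if add_current_group == true && !(new_table.contains current_group) then
        new_table ++ [current_group]
      else new_table) []

-- ===== PORT B =====
def remove_contained_groups_alt (groups : List (List Int)) : List (List Int) :=
  let maximal :=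
    (PySem.List.sorted groups (fun g => g.length) true).foldl
      (fun maximal g =>
        if maximal.any (fun h => decide (h.length > g.length) && g.all (fun x => h.contains x)) then
          maximal
        else maximal ++ [g]) []
  (PySem.List.sorted groups (fun g => g.length) false).foldl
    (fun result g =>
      if !(maximal.any (fun h => decide (h.length > g.length) && g.all (fun x => h.contains x))) then
        (if !(result.contains g) then result ++ [g] else result)
      else result) []

-- ===== PRECONDITION & SPEC =====
def Spec_remove_contained_groups (groups : List (List Int)) (out : List (List Int)) : Prop := out = remove_contained_groups_alt groups
instance (groups : List (List Int)) (out : List (List Int)) : Decidable (Spec_remove_contained_groups groups out) := by unfold Spec_remove_contained_groups; infer_instance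

-- ===== CLAIM (what is proved, stated in full; the proofs are below) =====
def Claim_equal_remove_contained_groups : Prop := ∀ (groups : List (List Int)), Dom_remove_contained_groups groups → Spec_remove_contained_groups groups (remove_contained_groups groups)

-- ===== LEMMAS AND PROOFS =====

-- "g is strictly contained in some member of L" (the shared predicate of both ports)
def pvCond (L : List (List Int)) (g : List Int) : Bool :=
  L.any (fun h => decide (h.length > g.length) && g.all (fun x => h.contains x))

def pvStep (acc : List (List Int)) (g : List Int) : List (List Int) :=
  if pvCond acc g then acc else acc ++ [g]

def pvMaximal (groups : List (List Int)) : List (List Int) :=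
  (PySem.List.sorted groups (fun g => g.length) true).foldl pvStep []

theorem pv_isin_eq (s l : List Int) :
    is_small_list_in_large_list s l = s.all (fun x => l.contains x) := by
  unfold is_small_list_in_large_list
  suffices h : ∀ (b : Bool), s.foldl (fun value row => if !(l.contains row) then false else value) b
      = (b && s.all (fun x => l.contains x)) by simpa using h true
  induction s with
  | nil => intro b; simp
  | cons a t ih =>
    intro b
    simp only [List.foldl_cons, List.all_cons, ih]
    cases hc : l.contains a <;> simp

theorem innerA_eq (g : List Int) (l : List (List Int)) (b : Bool) :
    l.foldl (fun add c =>
      if c.length > g.length then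
        (if is_small_list_in_large_list g c == true then false else add)
      else add) b
    = (b && !(pvCond l g)) := by
  induction l generalizing b with
  | nil => simp [pvCond]
  | cons a t ih =>
    have hstep : (if a.length > g.length then
          (if is_small_list_in_large_list g a == true then false else b) else b)
        = (b && !(decide (a.length > g.length) && g.all (fun x => a.contains x))) := by
      by_cases hl : a.length > g.length
      · rw [pv_isin_eq, if_pos hl]
        cases hga : g.all (fun x => a.contains x) <;> simp [hl]
      · rw [if_neg hl]
        simp [hl]
    rw [List.foldl_cons, hstep, ih]
    simp only [pvCond, List.any_cons, Bool.not_or, Bool.and_assoc]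

theorem pvCond_sorted (groups : List (List Int)) (g : List Int) :
    pvCond (PySem.List.sorted groups (fun h => h.length) false) g = pvCond groups g := by
  unfold pvCond
  rw [Bool.eq_iff_iff]
  simp only [List.any_eq_true, PySem.List.mem_sorted]

theorem pvCond_mono {acc L : List (List Int)} (hsub : ∀ x ∈ acc, x ∈ L) {g : List Int}
    (h : pvCond acc g = true) : pvCond L g = true := by
  simp only [pvCond, List.any_eq_true] at *
  obtain ⟨x, hm, hp⟩ := h
  exact ⟨x, hsub x hm, hp⟩

theorem pvStep_acc_sub (acc : List (List Int)) (g : List Int) :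
    ∀ x ∈ acc, x ∈ pvStep acc g := by
  intro x hx
  unfold pvStep
  split
  · exact hx
  · exact List.mem_append_left _ hx

theorem pvStep_sub (l : List (List Int)) (acc : List (List Int)) :
    ∀ x ∈ acc, x ∈ l.foldl pvStep acc := by
  induction l generalizing acc with
  | nil => intro x hx; simpa using hx
  | cons a t ih =>
    intro x hx
    simp only [List.foldl_cons]
    exact ih _ _ (pvStep_acc_sub _ _ x hx)

theorem pvStep_mem (l : List (List Int)) (acc : List (List Int)) :
    ∀ x ∈ l.foldl pvStep acc, x ∈ acc ∨ x ∈ l := by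
  induction l generalizing acc with
  | nil => intro x hx; left; simpa using hx
  | cons a t ih =>
    intro x hx
    simp only [List.foldl_cons] at hx
    rcases ih _ x hx with h | h
    · unfold pvStep at h
      split at h
      · exact Or.inl h
      · rcases List.mem_append.1 h with h | h
        · exact Or.inl h
        · simp at h; subst h; right; simp
    · right; simp [h]

theorem pvStep_covered (l : List (List Int)) (acc : List (List Int)) :
    ∀ h ∈ l, h ∈ l.foldl pvStep acc ∨ pvCond (l.foldl pvStep acc) h = true := by
  induction l generalizing acc with
  | nil => intro h hh; simp at hh
  | cons a t ih =>
    intro h hh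
    simp only [List.foldl_cons]
    rcases List.mem_cons.1 hh with rfl | hh
    · by_cases hc : pvCond acc h = true
      · right
        apply pvCond_mono _ hc
        intro x hx
        exact pvStep_sub _ _ _ (pvStep_acc_sub _ _ x hx)
      · left
        apply pvStep_sub
        unfold pvStep
        rw [if_neg hc]
        simp
    · exact ih _ h hh

theorem pvCond_maximal (groups : List (List Int)) (g : List Int) :
    pvCond groups g = pvCond (pvMaximal groups) g := by
  rw [Bool.eq_iff_iff]
  constructor
  · intro h
    simp only [pvCond, List.any_eq_true] at h
    obtain ⟨h0, hm, hp⟩ := h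
    have hdesc : h0 ∈ PySem.List.sorted groups (fun g => g.length) true := by
      simpa [PySem.List.mem_sorted] using hm
    rcases pvStep_covered _ [] h0 hdesc with hin | hcov
    · simp only [pvCond, List.any_eq_true]
      exact ⟨h0, hin, hp⟩
    · simp only [Bool.and_eq_true, decide_eq_true_eq, List.all_eq_true] at hp
      simp only [pvCond, List.any_eq_true, Bool.and_eq_true, decide_eq_true_eq,
        List.all_eq_true] at hcov ⊢
      obtain ⟨j, hj, hlen, hsub⟩ := hcov
      refine ⟨j, hj, lt_trans hp.1 hlen, ?_⟩
      intro x hx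
      have hxh : x ∈ h0 := by
        have := hp.2 x hx
        simpa [List.contains_iff_mem] using this
      exact hsub x hxh
  · intro h
    apply pvCond_mono _ h
    intro x hx
    rcases pvStep_mem _ [] x hx with h' | h'
    · simp at h'
    · simpa [PySem.List.mem_sorted] using h' 

theorem emit_congr (c1 c2 : List Int → Bool) (h : ∀ g, c1 g = c2 g) :
    ∀ (l : List (List Int)) (acc : List (List Int)),
      l.foldl (fun nt g => if c1 g && !(nt.contains g) then nt ++ [g] else nt) acc
      = l.foldl (fun nt g => if c2 g then (if !(nt.contains g) then nt ++ [g] else nt) else nt) acc := by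
  intro l
  induction l with
  | nil => intro acc; rfl
  | cons a t ih =>
    intro acc
    simp only [List.foldl_cons, ih]
    congr 1
    rw [← h a]
    cases hc : c1 a <;> cases hm : acc.contains a <;> simp

-- ===== VERDICT (by name: the statement is the Claim_ definition above) =====
theorem remove_contained_groups_spec : Claim_equal_remove_contained_groups := by
  intro groups _
  show remove_contained_groups groups = remove_contained_groups_alt groups
  have hA : remove_contained_groups groups =
      (PySem.List.sorted groups (fun g => g.length) false).foldl
        (fun nt g =>
          if !(pvCond (PySem.List.sorted groups (fun g => g.length) false) g) && !(nt.contains g) then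
            nt ++ [g]
          else nt) [] := by
    unfold remove_contained_groups
    simp only [innerA_eq]
    simp only [Bool.true_and, beq_true]
  have hB : remove_contained_groups_alt groups =
      (PySem.List.sorted groups (fun g => g.length) false).foldl
        (fun nt g =>
          if !(pvCond (pvMaximal groups) g) then
            (if !(nt.contains g) then nt ++ [g] else nt)
          else nt) [] := rfl
  rw [hA, hB]
  exact emit_congr _ _ (fun g => by rw [pvCond_sorted, pvCond_maximal]) _ _
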